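-- pv_equiv track=rewrite | github.com/ClusterLabs/pcs | pcs/lib/cib/node_rename.py | _rename_in_host_map
-- ===== SOURCE A (Python) =====
-- def _rename_in_host_map(value: str, old_name: str, new_name: str) -> str:
--     # Format: node:port[,port];node:port
--     new_entries = []
--     for entry in value.split(";"):
--         if ":" not in entry:
--             # It's broken but if it's an old domain name, it can be confused
--             # with host_list. We cannot fix it but it makes sense to update
--             # host name if it exactly match with the old name.
--             new_entries.append(new_name if entry == old_name else entry)
--             continue
--         host, ports = entry.split(":", 1)
--         if host == old_name:
--             host = new_name
--         new_entries.append(f"{host}:{ports}")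
--     return ";".join(new_entries)
-- ===== SOURCE B (Python) =====
-- def _rename_in_host_map(value: str, old_name: str, new_name: str) -> str:
--     # Single left-to-right character scan: flush the current token at each
--     # ';' / host-terminating ':' boundary, substituting old_name -> new_name
--     # when the token sits in host position; no split/rebuild of entry lists.
--     out = []
--     token = []
--     host_done = False  # a ':' was already seen in the current entry
--     for ch in value:
--         if ch == ";":
--             tok = "".join(token)
--             out.append(new_name if (not host_done and tok == old_name) else tok)
--             out.append(";")
--             token = []
--             host_done = False
--         elif ch == ":" and not host_done:
--             tok = "".join(token)
--             out.append(new_name if tok == old_name else tok)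
--             out.append(":")
--             token = []
--             host_done = True
--         else:
--             token.append(ch)
--     tok = "".join(token)
--     out.append(new_name if (not host_done and tok == old_name) else tok)
--     return "".join(out)
-- ===== Notes on version B (the rewrite author's own statement) =====
-- stated objective: alternative
-- what changed: Replaces split-into-entries / per-entry split(':',1) / join rebuilding with a single left-to-right character scan that flushes tokens at ';' and host-terminating ':' boundaries, substituting the host token in place.
import Mathlib
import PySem

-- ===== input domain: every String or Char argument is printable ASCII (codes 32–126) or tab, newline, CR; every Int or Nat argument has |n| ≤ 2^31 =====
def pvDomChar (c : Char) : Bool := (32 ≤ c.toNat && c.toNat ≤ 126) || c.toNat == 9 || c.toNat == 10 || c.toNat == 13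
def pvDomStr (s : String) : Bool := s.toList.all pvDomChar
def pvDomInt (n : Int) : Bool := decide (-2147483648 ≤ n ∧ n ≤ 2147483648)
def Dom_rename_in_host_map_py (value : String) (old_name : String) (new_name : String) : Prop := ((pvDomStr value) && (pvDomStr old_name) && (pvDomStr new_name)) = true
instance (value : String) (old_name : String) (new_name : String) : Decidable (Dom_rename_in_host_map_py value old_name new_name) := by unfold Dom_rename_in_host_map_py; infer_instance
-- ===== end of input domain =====

-- B replaces A's split-into-entries / split-host / join rebuilding with a single
-- character scan that flushes tokens at ';' and host-terminating ':' boundaries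
-- (objective: alternative).

-- ===== PORT A =====
def rename_in_host_map_py (value : String) (old_name : String) (new_name : String) : String :=
  -- for entry in value.split(";")
  let entries := PySem.Chars.splitOn value.toList [';']
  let new_entries := entries.foldl (fun new_entries entry =>
    if PySem.Chars.isIn [':'] entry = false then
      -- new_entries.append(new_name if entry == old_name else entry)
      new_entries ++ [if entry = old_name.toList then new_name.toList else entry]
    else
      -- host, ports = entry.split(":", 1)  (":" is in entry, so exactly two parts)
      let parts := PySem.Chars.splitOnMax entry [':'] 1
      let host := parts.headD []
      let ports := (parts.drop 1).headD []
      let host := if host = old_name.toList then new_name.toList else host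
      -- new_entries.append(f"{host}:{ports}")
      new_entries ++ [host ++ [':'] ++ ports]) ([] : List (List Char))
  String.ofList (PySem.Chars.join [';'] new_entries)

-- ===== PORT B =====
-- one step of B's scan: state = (out, token, host_done)
def bStep (oldn newn : List Char) (st : List Char × List Char × Bool) (c : Char) :
    List Char × List Char × Bool :=
  match st with
  | (out, token, hostDone) =>
    if c = ';' then
      (out ++ (if !hostDone && token = oldn then newn else token) ++ [';'], [], false)
    else if c = ':' ∧ hostDone = false then
      (out ++ (if token = oldn then newn else token) ++ [':'], [], true)
    else
      (out, token ++ [c], hostDone)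

-- final flush after the loop
def bFinish (oldn newn : List Char) (st : List Char × List Char × Bool) : List Char :=
  match st with
  | (out, token, hostDone) => out ++ (if !hostDone && token = oldn then newn else token)

def rename_in_host_map_py_alt (value : String) (old_name : String) (new_name : String) : String :=
  String.ofList (bFinish old_name.toList new_name.toList
    (value.toList.foldl (bStep old_name.toList new_name.toList) ([], [], false)))

-- ===== PRECONDITION & SPEC =====
def Spec_rename_in_host_map_py (value : String) (old_name : String) (new_name : String) (out : String) : Prop := out = rename_in_host_map_py_alt value old_name new_name
instance (value : String) (old_name : String) (new_name : String) (out : String) : Decidable (Spec_rename_in_host_map_py value old_name new_name out) := by unfold Spec_rename_in_host_map_py; infer_instance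

-- ===== CLAIM (what is proved, stated in full; the proofs are below) =====
def Claim_equal_rename_in_host_map_py : Prop := ∀ (value : String) (old_name : String) (new_name : String), Dom_rename_in_host_map_py value old_name new_name → Spec_rename_in_host_map_py value old_name new_name (rename_in_host_map_py value old_name new_name)

-- ===== LEMMAS AND PROOFS =====

def splitSemi : List Char → List (List Char)
  | [] => [[]]
  | c :: rest =>
    if c = ';' then [] :: splitSemi rest
    else
      match splitSemi rest with
      | [] => [[c]]
      | p :: ps => (c :: p) :: ps

def mapHead (g : List Char → List Char) : List (List Char) → List (List Char)
  | [] => []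
  | p :: ps => g p :: ps

theorem splitSemi_ne_nil (l : List Char) : splitSemi l ≠ [] := by
  cases l with
  | nil => simp [splitSemi]
  | cons c rest =>
    simp only [splitSemi]
    split
    · simp
    · cases h : splitSemi rest <;> simp

theorem go_semi (fuel : Nat) : ∀ (l cur : List Char) (acc : List (List Char)),
    l.length < fuel →
    PySem.Chars.splitOn.go [';'] fuel l cur acc =
      acc.reverse ++ mapHead (fun p => cur.reverse ++ p) (splitSemi l) := by
  induction fuel with
  | zero => intro l cur acc h; omega
  | succ fuel ih =>
    intro l cur acc h
    cases l with
    | nil =>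
      simp [PySem.Chars.splitOn.go, splitSemi, mapHead]
    | cons c rest =>
      rw [PySem.Chars.splitOn.go]
      by_cases hc : c = ';'
      · subst hc
        simp only [List.isPrefixOf, List.isPrefixOf_nil_left]
        rw [if_pos (by simp)]
        simp only [List.length_cons, List.drop_succ_cons, List.length_nil, List.drop_zero]
        rw [ih rest [] (cur.reverse :: acc) (by simp at h; omega)]
        simp [splitSemi, mapHead]
        cases hs : splitSemi rest with
        | nil => exact absurd hs (splitSemi_ne_nil rest)
        | cons p ps => simp [mapHead]
      · rw [if_neg (by simp [List.isPrefixOf]; intro h'; exact hc h'.symm)]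
        rw [ih rest (c :: cur) acc (by simpa using Nat.lt_of_succ_lt_succ h)]
        simp only [splitSemi, if_neg hc]
        cases hs : splitSemi rest with
        | nil => exact absurd hs (splitSemi_ne_nil rest)
        | cons p ps => simp [mapHead]

theorem find_go_colon : ∀ (l : List Char) (k : Nat),
    (PySem.Chars.find.go [':'] l k != -1) = l.contains ':' := by
  intro l
  induction l with
  | nil => intro k; simp [PySem.Chars.find.go]
  | cons c rest ih =>
    intro k
    rw [PySem.Chars.find.go]
    by_cases hc : c = ':'
    · subst hc; rw [if_pos (by simp)]; simp
    · rw [if_neg (by simp [List.isPrefixOf]; intro h'; exact hc h'.symm)]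
      rw [ih (k+1)]
      simp [List.contains_cons, hc]
      intro h'; exact absurd h'.symm hc

theorem isIn_colon (l : List Char) : PySem.Chars.isIn [':'] l = l.contains ':' := by
  have h := find_go_colon l 0
  simpa [PySem.Chars.isIn, PySem.Chars.find] using h

theorem goMax_zero : ∀ (fuel : Nat) (l cur : List Char) (acc : List (List Char)),
    PySem.Chars.splitOnMax.go [':'] fuel 0 l cur acc = acc.reverse ++ [cur.reverse ++ l] := by
  intro fuel l cur acc
  cases fuel with
  | zero => rw [PySem.Chars.splitOnMax.go]; simp
  | succ fuel =>
    cases l with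
    | nil =>
      rw [PySem.Chars.splitOnMax.go]
      · simp
      · omega
    | cons c rest =>
      rw [PySem.Chars.splitOnMax.go]
      simp

theorem goMax_one (fuel : Nat) : ∀ (l cur : List Char) (acc : List (List Char)),
    l.length < fuel →
    PySem.Chars.splitOnMax.go [':'] fuel 1 l cur acc =
      acc.reverse ++ (if l.contains ':' then
        [cur.reverse ++ l.takeWhile (· ≠ ':'), (l.dropWhile (· ≠ ':')).tail]
      else [cur.reverse ++ l]) := by
  induction fuel with
  | zero => intro l cur acc h; omega
  | succ fuel ih =>
    intro l cur acc h
    cases l with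
    | nil =>
      rw [PySem.Chars.splitOnMax.go]
      · simp
      · omega
    | cons c rest =>
      rw [PySem.Chars.splitOnMax.go]
      rw [if_neg (by omega)]
      by_cases hc : c = ':'
      · subst hc
        rw [if_pos (by simp)]
        simp only [List.length_cons, List.drop_succ_cons, List.length_nil, List.drop_zero]
        rw [goMax_zero]
        simp [List.contains_cons, List.takeWhile, List.dropWhile]
      · rw [if_neg (by simp [List.isPrefixOf]; intro h'; exact hc h'.symm)]
        rw [ih rest (c :: cur) acc (by simp at h; omega)]
        have hcc : ¬ (':' = c) := fun h' => hc h'.symm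
        by_cases hr : rest.contains ':'
        · simp [List.takeWhile, List.dropWhile, hc, hcc, hr] at *
        · simp [List.takeWhile, List.dropWhile, hc, hcc, hr] at *

def fEnt (oldn newn : List Char) (e : List Char) : List Char :=
  if e.contains ':' = false then (if e = oldn then newn else e)
  else (if e.takeWhile (· ≠ ':') = oldn then newn else e.takeWhile (· ≠ ':')) ++
        ':' :: (e.dropWhile (· ≠ ':')).tail

def joinF (oldn newn : List Char) : List (List Char) → List Char
  | [] => []
  | [p] => fEnt oldn newn p
  | p :: q :: ps => fEnt oldn newn p ++ ';' :: joinF oldn newn (q :: ps)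

def joinTail (oldn newn : List Char) : List (List Char) → List Char
  | [] => []
  | ps => ';' :: joinF oldn newn ps

def joinWith (oldn newn token : List Char) : List (List Char) → List Char
  | [] => []
  | p :: ps => fEnt oldn newn (token ++ p) ++ joinTail oldn newn ps

def portsWith (token : List Char) (oldn newn : List Char) : List (List Char) → List Char
  | [] => []
  | p :: ps => token ++ p ++ joinTail oldn newn ps

theorem tw_dw (q0 : List Char) : ∀ (token : List Char), token.contains ':' = false →
    (token ++ ':' :: q0).takeWhile (· ≠ ':') = token ∧
    (token ++ ':' :: q0).dropWhile (· ≠ ':') = ':' :: q0 := by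
  intro token
  induction token with
  | nil => intro _; simp [List.takeWhile, List.dropWhile]
  | cons c cs ih =>
    intro h
    simp only [List.contains_cons, Bool.or_eq_false_iff, beq_eq_false_iff_ne] at h
    obtain ⟨h1, h2⟩ := h
    have := ih h2
    have h1' : c ≠ ':' := Ne.symm h1
    simp [List.takeWhile, List.dropWhile, h1'] at this ⊢
    exact this

theorem fEnt_no_colon (oldn newn token : List Char) (h : token.contains ':' = false) :
    fEnt oldn newn token = (if token = oldn then newn else token) := by
  unfold fEnt; rw [if_pos h]

theorem joinF_eq (oldn newn : List Char) : ∀ (ss : List (List Char)),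
    PySem.Chars.join [';'] (ss.map (fEnt oldn newn)) = joinF oldn newn ss := by
  intro ss
  induction ss with
  | nil => simp [joinF, PySem.Chars.join, List.intercalate]
  | cons p ps ih =>
    cases ps with
    | nil => simp [joinF, PySem.Chars.join, List.intercalate]
    | cons q qs =>
      simp only [List.map_cons] at ih ⊢
      rw [PySem.Chars.join_cons_cons, ih]
      simp [joinF]

theorem joinF_cons (oldn newn : List Char) (p : List Char) (ps : List (List Char)) :
    joinF oldn newn (p :: ps) = fEnt oldn newn p ++ joinTail oldn newn ps := by
  cases ps <;> simp [joinF, joinTail]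

theorem B_run (oldn newn : List Char) : ∀ (cs out token : List Char) (hostDone : Bool),
    (hostDone = false → token.contains ':' = false) →
    bFinish oldn newn (cs.foldl (bStep oldn newn) (out, token, hostDone)) =
      out ++ (if hostDone then portsWith token oldn newn (splitSemi cs)
              else joinWith oldn newn token (splitSemi cs)) := by
  intro cs
  induction cs with
  | nil =>
    intro out token hostDone htok
    cases hostDone with
    | true => simp [bFinish, splitSemi, portsWith, joinTail]
    | false =>
      simp only [List.foldl_nil, bFinish, splitSemi, joinWith, joinTail]
      rw [fEnt_no_colon oldn newn (token ++ []) (by simpa using htok rfl)]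
      simp
  | cons c cs ih =>
    intro out token hostDone htok
    rw [List.foldl_cons]
    obtain ⟨q0, qs, hss⟩ : ∃ q0 qs, splitSemi cs = q0 :: qs := by
      cases hs : splitSemi cs with
      | nil => exact absurd hs (splitSemi_ne_nil cs)
      | cons a b => exact ⟨a, b, rfl⟩
    by_cases hc : c = ';'
    · subst hc
      have hb : bStep oldn newn (out, token, hostDone) ';' =
          (out ++ (if !hostDone && token = oldn then newn else token) ++ [';'], [], false) := by
        simp [bStep]
      rw [hb, ih _ [] false (fun _ => rfl)]
      have hsplit : splitSemi (';' :: cs) = [] :: splitSemi cs := by simp [splitSemi]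
      rw [hsplit, hss]
      cases hostDone with
      | true =>
        simp [portsWith, joinWith, joinTail, joinF_cons]
      | false =>
        have h0 : fEnt oldn newn token = (if token = oldn then newn else token) :=
          fEnt_no_colon oldn newn token (htok rfl)
        simp [joinWith, joinTail, joinF_cons, h0]
    · by_cases hcd : c = ':' ∧ hostDone = false
      · obtain ⟨hc2, hd⟩ := hcd
        subst hc2 hd
        have hb : bStep oldn newn (out, token, false) ':' =
            (out ++ (if token = oldn then newn else token) ++ [':'], [], true) := by
          simp [bStep, hc]
        rw [hb, ih _ [] true (by intro h; cases h)]
        have hsplit : splitSemi (':' :: cs) = (':' :: q0) :: qs := by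
          simp [splitSemi, hc, hss]
        rw [hsplit]
        have htok' := htok rfl
        have htw := tw_dw q0 token htok'
        have hcol : (token ++ ':' :: q0).contains ':' = true := by
          simp [List.contains_append]
        have hf : fEnt oldn newn (token ++ ':' :: q0) =
            (if token = oldn then newn else token) ++ ':' :: q0 := by
          unfold fEnt
          rw [if_neg (by simp [hcol])]
          rw [htw.1, htw.2]
          simp
        rw [hss]
        simp [portsWith, joinWith, hf]
      · have hb : bStep oldn newn (out, token, hostDone) c = (out, token ++ [c], hostDone) := by
          simp only [bStep]
          rw [if_neg hc, if_neg hcd]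
        have hsplit : splitSemi (c :: cs) = (c :: q0) :: qs := by
          simp [splitSemi, hc, hss]
        rw [hb]
        cases hostDone with
        | true =>
          rw [ih _ (token ++ [c]) true (by intro h; cases h)]
          rw [hsplit, hss]
          simp [portsWith]
        | false =>
          have hc2 : c ≠ ':' := by intro h; exact hcd ⟨h, rfl⟩
          have htok' : (token ++ [c]).contains ':' = false := by
            have hm : ':' ∉ token := by
              intro hmem
              have := htok rfl
              simp [List.contains_iff_mem] at this
              exact this hmem
            simp [List.contains_append]
            exact ⟨hm, fun h => hc2 (Eq.symm h)⟩
          rw [ih _ (token ++ [c]) false (fun _ => htok')]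
          rw [hsplit, hss]
          simp [joinWith]
theorem Astep_eq_fEnt (oldn newn e : List Char) :
    (if PySem.Chars.isIn [':'] e = false then
        (if e = oldn then newn else e)
      else
        let parts := PySem.Chars.splitOnMax e [':'] 1
        let host := parts.headD []
        let ports := (parts.drop 1).headD []
        let host := if host = oldn then newn else host
        host ++ [':'] ++ ports) = fEnt oldn newn e := by
  rw [isIn_colon]
  by_cases h : e.contains ':'
  · have hmem : ':' ∈ e := by
      have := h
      simp only [List.contains_iff_mem] at this
      exact this
    rw [if_neg (by rw [h]; simp)]
    unfold fEnt
    rw [if_neg (by rw [h]; simp)]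
    have hmax : PySem.Chars.splitOnMax e [':'] 1 =
        PySem.Chars.splitOnMax.go [':'] (e.length + 1) 1 e [] [] := by
      simp [PySem.Chars.splitOnMax]
    rw [hmax, goMax_one (e.length + 1) e [] [] (by omega)]
    rw [if_pos h]
    simp
  · have h' : e.contains ':' = false := by simpa using h
    rw [if_pos h']
    unfold fEnt
    rw [if_pos h']

theorem foldl_astep_eq (oldn newn : List Char) : ∀ (ss : List (List Char)) (acc : List (List Char)),
    ss.foldl (fun new_entries entry =>
      if PySem.Chars.isIn [':'] entry = false then
        new_entries ++ [if entry = oldn then newn else entry]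
      else
        let parts := PySem.Chars.splitOnMax entry [':'] 1
        let host := parts.headD []
        let ports := (parts.drop 1).headD []
        let host := if host = oldn then newn else host
        new_entries ++ [host ++ [':'] ++ ports]) acc =
      acc ++ ss.map (fEnt oldn newn) := by
  intro ss
  induction ss with
  | nil => intro acc; simp
  | cons e es ih =>
    intro acc
    rw [List.foldl_cons, ih]
    have hstep : (if PySem.Chars.isIn [':'] e = false then
        acc ++ [if e = oldn then newn else e]
      else
        let parts := PySem.Chars.splitOnMax e [':'] 1
        let host := parts.headD []
        let ports := (parts.drop 1).headD []
        let host := if host = oldn then newn else host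
        acc ++ [host ++ [':'] ++ ports]) = acc ++ [fEnt oldn newn e] := by
      rw [← Astep_eq_fEnt oldn newn e]
      by_cases h : PySem.Chars.isIn [':'] e = false <;> simp [h]
    rw [hstep]
    simp

theorem splitOn_eq_splitSemi (l : List Char) :
    PySem.Chars.splitOn l [';'] = splitSemi l := by
  rw [PySem.Chars.splitOn, go_semi (l.length + 1) l [] [] (by omega)]
  cases hs : splitSemi l with
  | nil => exact absurd hs (splitSemi_ne_nil l)
  | cons p ps => simp [mapHead]

theorem A_eq (value old_name new_name : String) :
    rename_in_host_map_py value old_name new_name =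
      String.ofList (joinF old_name.toList new_name.toList (splitSemi value.toList)) := by
  show String.ofList (PySem.Chars.join [';']
    ((PySem.Chars.splitOn value.toList [';']).foldl _ [])) = _
  rw [splitOn_eq_splitSemi, foldl_astep_eq old_name.toList new_name.toList (splitSemi value.toList) []]
  rw [List.nil_append, joinF_eq]

theorem joinWith_nil_eq_joinF (oldn newn : List Char) (ss : List (List Char)) :
    joinWith oldn newn [] ss = joinF oldn newn ss := by
  cases ss with
  | nil => simp [joinWith, joinF]
  | cons p ps => simp [joinWith, joinF_cons]

theorem B_eq (value old_name new_name : String) :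
    rename_in_host_map_py_alt value old_name new_name =
      String.ofList (joinF old_name.toList new_name.toList (splitSemi value.toList)) := by
  unfold rename_in_host_map_py_alt
  rw [B_run old_name.toList new_name.toList value.toList [] [] false (fun _ => rfl)]
  simp [joinWith_nil_eq_joinF]

theorem main_eq (value old_name new_name : String) :
    rename_in_host_map_py value old_name new_name =
      rename_in_host_map_py_alt value old_name new_name := by
  rw [A_eq, B_eq]

-- ===== VERDICT (by name: the statement is the Claim_ definition above) =====
theorem rename_in_host_map_py_spec : Claim_equal_rename_in_host_map_py := by
  intro value old_name new_name _
  exact main_eq value old_name new_name
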